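-- pv_equiv track=rewrite | github.com/whereismyguts/rest | app/weather_service/info/service.py | is_temp_cross_zero
-- ===== SOURCE A (Python) =====
-- def is_temp_cross_zero(temp_list):
--     prev_sign = None
--     for tmp in temp_list:
--         if tmp == 0:
--             return True
--
--         sign = tmp > 0 - tmp < 0
--         if prev_sign is not None:
--             if sign != prev_sign:
--                 return True
--         prev_sign = sign
--     return False
-- ===== SOURCE B (Python) =====
-- def is_temp_cross_zero(temp_list):
--     seen_pos = False
--     seen_neg = False
--     for tmp in temp_list:
--         if tmp == 0:
--             return True
--         if tmp > 0:
--             seen_pos = True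
--         else:
--             seen_neg = True
--         if seen_pos and seen_neg:
--             return True
--     return False
-- ===== Notes on version B (the rewrite author's own statement) =====
-- stated objective: alternative
-- what changed: Replaces the previous-sign tracker (prev_sign = sign of the last element, compared against the current sign) with two global presence flags seen_pos/seen_neg that never reset, returning True as soon as both signs have been observed; equivalent because with zeros short-circuiting, an adjacent sign change exists iff both signs occur.
import Mathlib
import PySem

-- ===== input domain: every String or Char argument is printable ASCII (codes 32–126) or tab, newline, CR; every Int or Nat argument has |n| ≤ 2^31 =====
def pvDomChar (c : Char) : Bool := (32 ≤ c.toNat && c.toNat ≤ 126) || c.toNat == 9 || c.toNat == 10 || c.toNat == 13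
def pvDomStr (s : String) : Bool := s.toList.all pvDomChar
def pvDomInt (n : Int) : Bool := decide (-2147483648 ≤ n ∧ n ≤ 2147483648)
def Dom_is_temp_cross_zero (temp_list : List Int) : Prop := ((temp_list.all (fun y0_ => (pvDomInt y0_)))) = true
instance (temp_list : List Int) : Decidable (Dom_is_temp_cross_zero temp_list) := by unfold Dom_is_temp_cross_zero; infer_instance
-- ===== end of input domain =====

-- B replaces the previous-sign tracker with two accumulating presence flags (seen_pos/seen_neg); alternative decomposition, same cost.


-- ===== PORT A =====
-- loop with prev_sign : Option Bool; Python's chained 'tmp > 0 - tmp < 0' is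
-- '(tmp > -tmp) and (-tmp < 0)', i.e. decide (tmp > 0), transcribed literally below
def isTempCrossZeroGoA (prev_sign : Option Bool) : List Int → Bool
  | [] => false
  | tmp :: ts =>
    if tmp = 0 then true
    else
      let sign := decide (tmp > 0 - tmp) && decide (0 - tmp < 0)
      match prev_sign with
      | some p => if sign ≠ p then true else isTempCrossZeroGoA (some sign) ts
      | none => isTempCrossZeroGoA (some sign) ts

def is_temp_cross_zero (temp_list : List Int) : Bool :=
  isTempCrossZeroGoA none temp_list

-- ===== PORT B =====
def isTempCrossZeroGoB (seen_pos seen_neg : Bool) : List Int → Bool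
  | [] => false
  | tmp :: ts =>
    if tmp = 0 then true
    else
      let sp := if tmp > 0 then true else seen_pos
      let sn := if tmp > 0 then seen_neg else true
      if sp && sn then true else isTempCrossZeroGoB sp sn ts

def is_temp_cross_zero_alt (temp_list : List Int) : Bool :=
  isTempCrossZeroGoB false false temp_list

-- ===== PRECONDITION & SPEC =====
def Spec_is_temp_cross_zero (temp_list : List Int) (out : Bool) : Prop := out = is_temp_cross_zero_alt temp_list
instance (temp_list : List Int) (out : Bool) : Decidable (Spec_is_temp_cross_zero temp_list out) := by unfold Spec_is_temp_cross_zero; infer_instance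

-- ===== CLAIM (what is proved, stated in full; the proofs are below) =====
def Claim_equal_is_temp_cross_zero : Prop := ∀ (temp_list : List Int), Dom_is_temp_cross_zero temp_list → Spec_is_temp_cross_zero temp_list (is_temp_cross_zero temp_list)

-- ===== LEMMAS AND PROOFS =====

-- invariant: once every scanned element is nonzero of sign s, A carries prev_sign = some s
-- while B carries seen_pos = s, seen_neg = !s
lemma goA_eq_goB_some (ts : List Int) (s : Bool) :
    isTempCrossZeroGoA (some s) ts = isTempCrossZeroGoB s (!s) ts := by
  induction ts generalizing s with
  | nil => rfl
  | cons tmp ts ih =>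
    simp only [isTempCrossZeroGoA, isTempCrossZeroGoB]
    by_cases h0 : tmp = 0
    · simp [h0]
    · simp only [h0, if_false]
      by_cases hp : tmp > 0
      · have hs : (decide (tmp > 0 - tmp) && decide (0 - tmp < 0)) = true := by
          simp; omega
        cases s <;> simp [hp, ih]
      · have hs : (decide (tmp > 0 - tmp) && decide (0 - tmp < 0)) = false := by
          simp; omega
        cases s <;> simp [hp, ih]

lemma goA_eq_goB_none (ts : List Int) :
    isTempCrossZeroGoA none ts = isTempCrossZeroGoB false false ts := by
  cases ts with
  | nil => rfl
  | cons tmp ts =>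
    simp only [isTempCrossZeroGoA, isTempCrossZeroGoB]
    by_cases h0 : tmp = 0
    · simp [h0]
    · simp only [h0, if_false]
      by_cases hp : tmp > 0
      · have hs : (decide (tmp > 0 - tmp) && decide (0 - tmp < 0)) = true := by
          simp; omega
        simp [hp, goA_eq_goB_some]
      · have hs : (decide (tmp > 0 - tmp) && decide (0 - tmp < 0)) = false := by
          simp; omega
        simp [hp, goA_eq_goB_some]

-- ===== VERDICT (by name: the statement is the Claim_ definition above) =====
theorem is_temp_cross_zero_spec : Claim_equal_is_temp_cross_zero := by
  intro temp_list _
  unfold Spec_is_temp_cross_zero is_temp_cross_zero is_temp_cross_zero_alt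
  exact goA_eq_goB_none temp_list
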